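-- pv_equiv track=rewrite | github.com/Bipinoli/Random-Algorithmic-Challenges | essential_data_structures/segment_tree/seg_tree.py | binary_container
-- ===== SOURCE A (Python) =====
-- def binary_container(n):
--     bits = 0
--     while n > 0:
--         bits += 1
--         n >>= 1
--     if 2**(bits - 1) == n:
--         return n
--     return 2**bits
-- ===== SOURCE B (Python) =====
-- def binary_container(n):
--     return 1 << max(n, 0).bit_length()
-- ===== Notes on version B (the rewrite author's own statement) =====
-- stated objective: idiomatic
-- what changed: Replaced the shift-count loop (and its dead post-loop check, which can never fire) with a single closed-form expression: one shifted left by the bit length of the nonnegative part of n.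
import Mathlib
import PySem

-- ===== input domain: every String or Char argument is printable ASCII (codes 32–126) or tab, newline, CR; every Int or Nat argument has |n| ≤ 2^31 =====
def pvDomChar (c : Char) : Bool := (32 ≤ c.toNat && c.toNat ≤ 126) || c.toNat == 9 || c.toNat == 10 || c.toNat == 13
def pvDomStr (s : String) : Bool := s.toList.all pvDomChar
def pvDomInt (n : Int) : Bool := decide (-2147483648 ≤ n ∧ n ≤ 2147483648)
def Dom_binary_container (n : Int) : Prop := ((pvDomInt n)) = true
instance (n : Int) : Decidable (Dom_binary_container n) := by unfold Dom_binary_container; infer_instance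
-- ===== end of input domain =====

-- B replaces A's shift-count loop (whose post-loop check is dead code) with the closed form
-- 1 << max(n,0).bit_length(); objective: idiomatic/closed-form, same observable behaviour.


-- ===== PORT A =====
-- 'while n > 0: bits += 1; n >>= 1'  (n >> 1 on an int is floor division by 2)
def bcLoop (n : Int) (bits : Nat) : Int × Nat :=
  if h : 0 < n then bcLoop (PySem.Int.floordiv n 2) (bits + 1) else (n, bits)
termination_by n.toNat
decreasing_by
  rw [PySem.Int.floordiv_eq_ediv_of_pos (by omega : (0:Int) < 2)]
  omega

def binary_container (n : Int) : Int :=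
  let p := bcLoop n 0
  -- Python's 'if 2**(bits - 1) == n': when bits = 0 the left side is the float 0.5,
  -- never equal to the int n, so the comparison is exactly 'bits > 0 ∧ 2^(bits-1) = n'.
  if 0 < p.2 ∧ (2:Int) ^ (p.2 - 1) = p.1 then p.1 else (2:Int) ^ p.2

-- ===== PORT B =====
-- Source B: return 1 << max(n, 0).bit_length()
def binary_container_alt (n : Int) : Int :=
  1 * 2 ^ PySem.Int.bitLength (max n 0)

-- ===== PRECONDITION & SPEC =====
def Spec_binary_container (n : Int) (out : Int) : Prop := out = binary_container_alt n
instance (n : Int) (out : Int) : Decidable (Spec_binary_container n out) := by unfold Spec_binary_container; infer_instance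

-- ===== CLAIM (what is proved, stated in full; the proofs are below) =====
def Claim_equal_binary_container : Prop := ∀ (n : Int), Dom_binary_container n → Spec_binary_container n (binary_container n)

-- ===== LEMMAS AND PROOFS =====
lemma bcLoop_nonpos (n : Int) (b : Nat) (h : ¬ 0 < n) : bcLoop n b = (n, b) := by
  rw [bcLoop]; simp [h]

lemma bcLoop_pos (n : Int) (b : Nat) (h : 0 < n) :
    bcLoop n b = (0, b + PySem.Int.bitLength n) := by
  induction hk : n.toNat using Nat.strong_induction_on generalizing n b with
  | _ k ih =>
    rw [bcLoop]; simp only [h, dite_true]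
    have h2 : PySem.Int.floordiv n 2 = n / 2 :=
      PySem.Int.floordiv_eq_ediv_of_pos (by omega)
    rw [PySem.Int.bitLength_of_pos h]
    by_cases hp : 0 < PySem.Int.floordiv n 2
    · rw [ih (PySem.Int.floordiv n 2).toNat (by rw [h2]; omega) _ _ hp rfl]
      ring_nf
    · rw [bcLoop_nonpos _ _ hp]
      have : PySem.Int.floordiv n 2 = 0 := by rw [h2] at hp ⊢; omega
      rw [this]
      simp [PySem.Int.bitLength_zero]

theorem binary_container_spec : Claim_equal_binary_container := by
  intro n _
  unfold Spec_binary_container binary_container binary_container_alt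
  by_cases h : 0 < n
  · rw [bcLoop_pos n 0 h]
    have hm : max n 0 = n := by omega
    simp [hm]
  · rw [bcLoop_nonpos n 0 h]
    have hm : max n 0 = 0 := by omega
    simp [hm, PySem.Int.bitLength_zero]
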